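-- pv_equiv track=rewrite | github.com/Jkaslam/CribbageAI | cribbage_scoring.py | peg_runs
-- ===== SOURCE A (Python) =====
-- def peg_runs(cards):
--     if len(cards) == 2:
--         return 0
--     sorted_cards = sorted(cards, key=lambda card: card[0])
--     adj_vals = []
--     for i in range(len(cards) - 1):
--         adj_vals += [sorted_cards[i+1][0] - sorted_cards[i][0]]
--     if (len(set(adj_vals)) == 1) and adj_vals[0] == 1:
--         return len(cards)
--     else:
--         return peg_runs(cards[1:])
-- ===== SOURCE B (Python) =====
-- def peg_runs(cards):
--     n = len(cards)
--     for i in range(n - 2):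
--         vals = sorted(card[0] for card in cards[i:])
--         if vals == list(range(vals[0], vals[0] + n - i)):
--             return n - i
--     return 0
-- ===== Notes on version B (the rewrite author's own statement) =====
-- stated objective: simpler
-- what changed: A's front-trimming recursion with an adjacency-difference list and a set-size test is replaced by a single explicit loop over suffix start indices that compares the sorted suffix values directly against an arithmetic range.
import Mathlib
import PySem

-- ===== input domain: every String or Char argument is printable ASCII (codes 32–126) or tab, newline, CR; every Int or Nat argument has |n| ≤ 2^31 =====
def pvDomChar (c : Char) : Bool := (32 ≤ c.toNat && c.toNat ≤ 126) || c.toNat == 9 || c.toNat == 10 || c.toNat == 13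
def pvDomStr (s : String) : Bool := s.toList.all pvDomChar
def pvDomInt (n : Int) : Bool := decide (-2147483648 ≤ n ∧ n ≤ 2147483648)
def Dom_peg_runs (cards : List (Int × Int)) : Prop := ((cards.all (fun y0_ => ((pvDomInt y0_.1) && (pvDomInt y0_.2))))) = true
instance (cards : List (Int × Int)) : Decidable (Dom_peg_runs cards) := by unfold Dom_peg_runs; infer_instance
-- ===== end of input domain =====

-- B replaces A's front-trimming recursion (sort pairs, adjacency-diff list, set-size check) by a single
-- loop over suffix start indices that compares the sorted values directly to an arithmetic range; objective: simpler.

-- ===== PORT A =====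
-- fuel-based transcription of A's recursion; Python recurses on cards[1:], so under Pre_ (length ≥ 2)
-- fuel cards.length + 1 is never exhausted (the 0-fuel branch is unreachable on Pre_).
def pegGo : Nat → List (Int × Int) → Int
  | 0, _ => 0
  | fuel + 1, cards =>
    if cards.length == 2 then 0
    else
      let sorted_cards := PySem.List.sorted cards (fun card => card.1) false
      let adj_vals := (PySem.List.pyRange 0 ((cards.length : Int) - 1) 1).foldl
        (fun acc i =>
          acc ++ [(PySem.List.pyGetD sorted_cards (i + 1) (0, 0)).1
                  - (PySem.List.pyGetD sorted_cards i (0, 0)).1]) []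
      if PySem.Set.len (PySem.Set.ofList adj_vals) == 1 && PySem.List.pyGetD adj_vals 0 0 == 1 then
        (cards.length : Int)
      else
        pegGo fuel (PySem.List.slice cards (some 1) none)

def peg_runs (cards : List (Int × Int)) : Int := pegGo (cards.length + 1) cards

-- ===== PORT B =====
def altLoop (cards : List (Int × Int)) : List Int → Int
  | [] => 0
  | i :: rest =>
    let tail := PySem.List.slice cards (some i) none
    let vals := PySem.List.sorted (tail.map Prod.fst) (fun x => x) false
    let v0 := PySem.List.pyGetD vals 0 0
    if vals == PySem.List.pyRange v0 (v0 + ((cards.length : Int) - i)) 1 then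
      (cards.length : Int) - i
    else
      altLoop cards rest

def peg_runs_alt (cards : List (Int × Int)) : Int :=
  altLoop cards (PySem.List.pyRange 0 ((cards.length : Int) - 2) 1)

-- ===== PRECONDITION & SPEC =====
-- Pre_ excludes lists of length 0 or 1, on which Python A recurses forever on cards[1:] and dies with RecursionError.
def Pre_peg_runs (cards : List (Int × Int)) : Prop := 2 ≤ cards.length
instance (cards : List (Int × Int)) : Decidable (Pre_peg_runs cards) := by unfold Pre_peg_runs; infer_instance
def pvWitness_peg_runs : (List (Int × Int)) := [(5, 0), (7, 1), (6, 2)]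

def Spec_peg_runs (cards : List (Int × Int)) (out : Int) : Prop := out = peg_runs_alt cards
instance (cards : List (Int × Int)) (out : Int) : Decidable (Spec_peg_runs cards out) := by unfold Spec_peg_runs; infer_instance

-- ===== CLAIM (what is proved, stated in full; the proofs are below) =====
def Claim_equal_peg_runs : Prop := ∀ (cards : List (Int × Int)), Dom_peg_runs cards → Pre_peg_runs cards → Spec_peg_runs cards (peg_runs cards)

-- ===== LEMMAS AND PROOFS =====

-- A's run test on a nonempty diff list: "one distinct value and the first is 1" means "every diff is 1".
theorem ones_iff (xs : List Int) (hne : xs ≠ []) :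
    ((PySem.Set.len (PySem.Set.ofList xs) == 1 && PySem.List.pyGetD xs 0 0 == 1) = true)
      ↔ ∀ x ∈ xs, x = 1 := by
  obtain ⟨hd, t, rfl⟩ : ∃ a l, xs = a :: l := by
    cases xs with
    | nil => exact absurd rfl hne
    | cons a l => exact ⟨a, l, rfl⟩
  simp only [Bool.and_eq_true, beq_iff_eq, PySem.List.pyGetD_zero, List.getD_cons_zero]
  constructor
  · rintro ⟨h1, hhd1⟩
    have hlen : (PySem.Set.ofList (hd :: t)).length = 1 := by
      simp only [PySem.Set.len] at h1; omega
    obtain ⟨a, ha⟩ := List.length_eq_one_iff.mp hlen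
    intro x hx
    have hxa : x = a := by
      have := (PySem.Set.mem_ofList (hd :: t) x).mpr hx
      simpa [ha] using this
    have hha : hd = a := by
      have := (PySem.Set.mem_ofList (hd :: t) hd).mpr (by simp)
      simpa [ha] using this
    rw [hxa, ← hha, hhd1]
  · intro hall
    have h1 : hd = 1 := hall hd (by simp)
    have hmem : ∀ x ∈ PySem.Set.ofList (hd :: t), x = 1 := by
      intro x hx; exact hall x ((PySem.Set.mem_ofList (hd :: t) x).mp hx)
    have hnd := PySem.Set.nodup_ofList (hd :: t)
    have hne2 : hd ∈ PySem.Set.ofList (hd :: t) := (PySem.Set.mem_ofList (hd :: t) hd).mpr (by simp)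
    refine ⟨?_, h1⟩
    match hS : PySem.Set.ofList (hd :: t) with
    | [] => rw [hS] at hne2; simp at hne2
    | [a] => simp [PySem.Set.len]
    | a :: b :: r =>
      rw [hS] at hmem hnd
      have ha := hmem a (by simp)
      have hb := hmem b (by simp)
      simp [ha, hb] at hnd

-- B's run test: a list equals range(v0, v0+len) iff consecutive entries step by 1.
theorem range_iff (v : List Int) :
    (v = PySem.List.pyRange (v.getD 0 0) (v.getD 0 0 + (v.length : Int)) 1)
      ↔ ∀ k, k + 1 < v.length → v.getD (k + 1) 0 = v.getD k 0 + 1 := by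
  constructor
  · intro h k hk
    have hget : ∀ j, j < v.length → v.getD j 0 = v.getD 0 0 + j := by
      intro j hj
      conv_lhs => rw [h]
      rw [PySem.List.pyRange_one]
      rw [PySem.List.getD_map_range _ _ _ _ (by omega)]
    rw [hget (k + 1) hk, hget k (by omega)]
    push_cast; ring
  · intro hstep
    have key : ∀ j, j < v.length → v.getD j 0 = v.getD 0 0 + j := by
      intro j
      induction j with
      | zero => intro _; simp
      | succ k ih =>
        intro hj
        rw [hstep k hj, ih (by omega)]
        push_cast; ring
    apply List.ext_getElem
    · rw [PySem.List.length_pyRange_one]; omega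
    · intro k h1 h2
      rw [PySem.List.getElem_pyRange_one]
      have := key k h1
      rw [List.getD_eq_getElem v 0 h1] at this
      rw [this]

-- the first components of A's key-sorted pairs are exactly B's sorted value list
theorem map_fst_sorted (c : List (Int × Int)) :
    PySem.List.sorted (c.map Prod.fst) (fun x => x) false
      = (PySem.List.sorted c (fun card => card.1) false).map Prod.fst := by
  apply PySem.List.sorted_id_eq_of_perm_of_pairwise
  · exact (PySem.List.sorted_perm c (fun card => card.1) false).map Prod.fst
  · exact PySem.List.sorted_map_key_pairwise c (fun card => card.1)

-- A's check (adjacency diffs of the sorted pairs all equal, first diff 1) coincides with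
-- B's check (sorted values equal an arithmetic range) on any list of length ≥ 2.
theorem check_equiv (c : List (Int × Int)) (h2 : 2 ≤ c.length) :
    (PySem.Set.len (PySem.Set.ofList ((PySem.List.pyRange 0 ((c.length : Int) - 1) 1).foldl
        (fun acc i =>
          acc ++ [(PySem.List.pyGetD (PySem.List.sorted c (fun card => card.1) false) (i + 1) (0, 0)).1
                  - (PySem.List.pyGetD (PySem.List.sorted c (fun card => card.1) false) i (0, 0)).1]) [])) == 1
      && PySem.List.pyGetD ((PySem.List.pyRange 0 ((c.length : Int) - 1) 1).foldl
        (fun acc i =>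
          acc ++ [(PySem.List.pyGetD (PySem.List.sorted c (fun card => card.1) false) (i + 1) (0, 0)).1
                  - (PySem.List.pyGetD (PySem.List.sorted c (fun card => card.1) false) i (0, 0)).1]) []) 0 0 == 1)
    = (PySem.List.sorted (c.map Prod.fst) (fun x => x) false
        == PySem.List.pyRange (PySem.List.pyGetD (PySem.List.sorted (c.map Prod.fst) (fun x => x) false) 0 0)
             (PySem.List.pyGetD (PySem.List.sorted (c.map Prod.fst) (fun x => x) false) 0 0 + (c.length : Int)) 1) := by
  rw [Bool.eq_iff_iff]
  set s := PySem.List.sorted c (fun card => card.1) false with hs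
  set v := PySem.List.sorted (c.map Prod.fst) (fun x => x) false with hv
  have hvs : v = s.map Prod.fst := map_fst_sorted c
  have hvlen : v.length = c.length := by
    rw [hvs, List.length_map, PySem.List.length_sorted]
  have hvne : v ≠ [] := by
    intro h
    rw [h] at hvlen; simp at hvlen; omega
  have hgd : ∀ i : Int, (PySem.List.pyGetD s i (0, 0)).1 = PySem.List.pyGetD v i 0 := by
    intro i
    rw [hvs, ← PySem.List.pyGetD_map Prod.fst s i (0, 0)]
  rw [PySem.List.foldl_append_singleton_eq_map, List.nil_append]
  rw [ones_iff _ (by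
    intro h
    have := congrArg List.length h
    simp [PySem.List.length_pyRange_one] at this
    omega)]
  rw [beq_iff_eq, PySem.List.pyGetD_zero, ← hvlen]
  rw [range_iff v]
  constructor
  · intro h k hk
    have hmem : ((k : Int)) ∈ PySem.List.pyRange 0 ((v.length : Int) - 1) 1 :=
      PySem.List.mem_pyRange_one.mpr ⟨by positivity, by omega⟩
    have := h _ (List.mem_map_of_mem hmem)
    rw [hgd, hgd] at this
    have e1 : ((k : Int) + 1) = ((k + 1 : Nat) : Int) := by push_cast; ring
    rw [e1] at this
    simp only [PySem.List.pyGetD_natCast] at this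
    omega
  · intro h x hx
    obtain ⟨i, hi, rfl⟩ := List.mem_map.mp hx
    obtain ⟨hi0, hi1⟩ := PySem.List.mem_pyRange_one.mp hi
    obtain ⟨k, rfl⟩ : ∃ k : Nat, i = (k : Int) := ⟨i.toNat, (Int.toNat_of_nonneg hi0).symm⟩
    rw [hgd, hgd]
    have e1 : ((k : Int) + 1) = ((k + 1 : Nat) : Int) := by push_cast; ring
    rw [e1]
    simp only [PySem.List.pyGetD_natCast]
    have := h k (by omega)
    omega

-- A's recursion on the suffix starting at i computes B's loop over the remaining start indices.
theorem main_loop (fuel : Nat) (cards : List (Int × Int)) (i : Nat)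
    (hle : i + 2 ≤ cards.length) (hf : cards.length - i ≤ fuel) :
    pegGo fuel (cards.drop i) = altLoop cards (PySem.List.pyRange (i : Int) ((cards.length : Int) - 2) 1) := by
  induction fuel generalizing i with
  | zero => omega
  | succ f ih =>
    by_cases hend : i + 2 = cards.length
    · rw [PySem.List.pyRange_one_eq_nil (by omega)]
      have hc : ((cards.drop i).length == 2) = true := by
        simp [List.length_drop]; omega
      simp only [pegGo, altLoop, hc, if_true]
    · have hlt : i + 3 ≤ cards.length := by omega
      have hc : ((cards.drop i).length == 2) = false := by
        simp [List.length_drop]; omega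
      rw [PySem.List.pyRange_one_cons (by omega : (i : Int) < (cards.length : Int) - 2)]
      simp only [pegGo, altLoop, hc, Bool.false_eq_true, if_false]
      rw [PySem.List.slice_from_natCast]
      have hlen : (cards.length : Int) - (i : Int) = ((cards.drop i).length : Int) := by
        simp [List.length_drop]; omega
      rw [hlen]
      rw [← check_equiv (cards.drop i) (by simp [List.length_drop]; omega)]
      split
      · rfl
      · rw [PySem.List.slice_from_one, List.tail_drop]
        have e1 : ((i : Int) + 1) = ((i + 1 : Nat) : Int) := by push_cast; ring
        rw [e1]
        exact ih (i + 1) (by omega) (by omega)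

-- ===== VERDICT (by name: the statement is the Claim_ definition above) =====
theorem peg_runs_spec : Claim_equal_peg_runs := by
  intro cards _ hpre
  unfold Spec_peg_runs peg_runs peg_runs_alt
  have := main_loop (cards.length + 1) cards 0 (by simpa using hpre) (by omega)
  simpa using this
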